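-- pv_equiv track=rewrite | github.com/Somto-Dera/py3_mis_proj | interview_qs/a_z/amazon_interview_q2.py | findEarliestMonth
-- ===== SOURCE A (Python) =====
-- def findEarliestMonth(stockPrice):
--     # Write your code here
--     month_list = []
--     min_month = 0
--     len_list = len(stockPrice)
--
--     for idx in range(1, len_list):
--         avg1 = 0
--         avg2 = 0
--         for item in range(0, idx):
--             avg1 += stockPrice[item]
--         avg1 //= (idx)
--
--         for item in range(idx, len_list):
--             avg2 += stockPrice[item]
--         avg2 //= (len_list - idx)
--
--         month_list.append(abs(avg1-avg2))
--
--     temp = month_list[0]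
--
--     for idx in range(0, len(month_list)):
--         if month_list[idx]<temp:
--             temp = month_list[idx]
--             min_month = idx + 1
--
--
--
--     return min_month
-- ===== SOURCE B (Python) =====
-- def findEarliestMonth(stockPrice):
--     n = len(stockPrice)
--     total = sum(stockPrice)
--     running = stockPrice[0]
--     best = abs(running - (total - running) // (n - 1))
--     month = 0
--     for idx in range(2, n):
--         running += stockPrice[idx - 1]
--         d = abs(running // idx - (total - running) // (n - idx))
--         if d < best:
--             best = d
--             month = idx
--     return month
-- ===== Notes on version B (the rewrite author's own statement) =====
-- stated objective: faster
-- what changed: A re-sums the left and right segments from scratch for every split and then scans the stored diff list; B precomputes the total once and maintains a running prefix sum, computing each split's diff in O(1) and fusing the minimum scan into the same single pass.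
import Mathlib
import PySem

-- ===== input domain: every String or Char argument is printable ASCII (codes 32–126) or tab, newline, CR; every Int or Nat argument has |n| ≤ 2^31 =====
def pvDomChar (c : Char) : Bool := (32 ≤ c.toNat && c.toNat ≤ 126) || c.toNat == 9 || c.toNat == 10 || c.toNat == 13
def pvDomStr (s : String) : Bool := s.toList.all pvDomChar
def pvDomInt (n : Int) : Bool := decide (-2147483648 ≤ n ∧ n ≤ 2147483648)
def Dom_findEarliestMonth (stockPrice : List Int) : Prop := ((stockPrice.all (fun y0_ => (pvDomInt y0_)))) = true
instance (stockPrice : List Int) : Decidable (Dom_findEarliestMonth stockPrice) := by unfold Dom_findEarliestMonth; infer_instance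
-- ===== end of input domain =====

-- B replaces A's re-summation of both sides of every split by one precomputed total and a
-- running prefix sum, fusing the minimum scan into the same pass (objective: faster).

-- ===== PORT A =====
def findEarliestMonth (stockPrice : List Int) : Int :=
  let lenList : Int := (stockPrice.length : Int)
  let monthList : List Int :=
    (PySem.List.pyRange 1 lenList).foldl (fun ml idx =>
      let avg1 := (PySem.List.pyRange 0 idx).foldl
        (fun a item => a + PySem.List.pyGetD stockPrice item 0) 0
      let avg1 := PySem.Int.floordiv avg1 idx
      let avg2 := (PySem.List.pyRange idx lenList).foldl
        (fun a item => a + PySem.List.pyGetD stockPrice item 0) 0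
      let avg2 := PySem.Int.floordiv avg2 (lenList - idx)
      ml ++ [|avg1 - avg2|]) []
  let temp := PySem.List.pyGetD monthList 0 0
  let res := (PySem.List.pyRange 0 (monthList.length : Int)).foldl
    (fun (st : Int × Int) idx =>
      if PySem.List.pyGetD monthList idx 0 < st.1
      then (PySem.List.pyGetD monthList idx 0, idx + 1)
      else st) (temp, 0)
  res.2

-- ===== PORT B =====
def findEarliestMonth_alt (stockPrice : List Int) : Int :=
  let n : Int := (stockPrice.length : Int)
  let total : Int := stockPrice.sum
  let running0 := PySem.List.pyGetD stockPrice 0 0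
  let best0 := |running0 - PySem.Int.floordiv (total - running0) (n - 1)|
  let st := (PySem.List.pyRange 2 n).foldl
    (fun (st : Int × Int × Int) idx =>
      let running := st.1 + PySem.List.pyGetD stockPrice (idx - 1) 0
      let d := |PySem.Int.floordiv running idx - PySem.Int.floordiv (total - running) (n - idx)|
      if d < st.2.1 then (running, d, idx) else (running, st.2.1, st.2.2))
    (running0, best0, 0)
  st.2.2

-- ===== PRECONDITION & SPEC =====
-- Pre_ excludes lists of length < 2, on which A raises (IndexError on month_list[0]).
def Pre_findEarliestMonth (stockPrice : List Int) : Prop := 2 ≤ stockPrice.length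
instance (stockPrice : List Int) : Decidable (Pre_findEarliestMonth stockPrice) := by
  unfold Pre_findEarliestMonth; infer_instance

def pvWitness_findEarliestMonth : List Int := [3, 1, 2]

def Spec_findEarliestMonth (stockPrice : List Int) (out : Int) : Prop := out = findEarliestMonth_alt stockPrice
instance (stockPrice : List Int) (out : Int) : Decidable (Spec_findEarliestMonth stockPrice out) := by unfold Spec_findEarliestMonth; infer_instance

-- ===== CLAIM (what is proved, stated in full; the proofs are below) =====
def Claim_equal_findEarliestMonth : Prop := ∀ (stockPrice : List Int), Dom_findEarliestMonth stockPrice → Pre_findEarliestMonth stockPrice → Spec_findEarliestMonth stockPrice (findEarliestMonth stockPrice)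

-- ===== LEMMAS AND PROOFS =====

-- |left floor-average − right floor-average| of the split after the first `idx` months
def pvF (xs : List Int) (idx : Int) : Int :=
  |PySem.Int.floordiv ((xs.take idx.toNat).sum) idx -
   PySem.Int.floordiv ((xs.drop idx.toNat).sum) ((xs.length : Int) - idx)|

-- the (best, month) state both scans share after considering the splits 1, …, k-1
def pvM (xs : List Int) : Nat → Int × Int
  | k + 3 =>
      let p := pvM xs (k + 2)
      if pvF xs ((k : Int) + 2) < p.1 then (pvF xs ((k : Int) + 2), (k : Int) + 2) else p
  | _ => (pvF xs 1, 0)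

lemma pvM_succ (xs : List Int) (k : Nat) (h : 2 ≤ k) :
    pvM xs (k + 1) =
      if pvF xs (k : Int) < (pvM xs k).1 then (pvF xs (k : Int), (k : Int)) else pvM xs k := by
  obtain ⟨m, rfl⟩ : ∃ m, k = m + 2 := ⟨k - 2, by omega⟩
  simp only [pvM]
  push_cast
  ring_nf

lemma ml_get (xs : List Int) (j : Int) (h0 : 0 ≤ j) (hj : j < (xs.length : Int) - 1) :
    PySem.List.pyGetD ((PySem.List.pyRange 1 (xs.length : Int)).map (pvF xs)) j 0
      = pvF xs (j + 1) := by
  have hlen : ((PySem.List.pyRange 1 (xs.length : Int)).map (pvF xs)).length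
      = ((xs.length : Int) - 1).toNat := by
    simp [PySem.List.length_pyRange_one]
  have hjl : j < (((PySem.List.pyRange 1 (xs.length : Int)).map (pvF xs)).length : Int) := by
    rw [hlen]; omega
  rw [PySem.List.pyGetD_eq_getElem _ _ h0 hjl]
  have hjn : j.toNat < (PySem.List.pyRange 1 (xs.length : Int)).length := by
    rw [PySem.List.length_pyRange_one]; omega
  rw [List.getElem_map, PySem.List.getElem_pyRange_one _ _ _ hjn, Int.toNat_of_nonneg h0,
      add_comm]

lemma sum_pyRange_take (xs : List Int) (k : Nat) (hk : k ≤ xs.length) :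
    (PySem.List.pyRange 0 (k : Int)).foldl
      (fun a item => a + PySem.List.pyGetD xs item 0) 0 = (xs.take k).sum := by
  induction k with
  | zero => simp [PySem.List.pyRange_one_eq_nil]
  | succ k ih =>
    rw [show ((k + 1 : Nat) : Int) = (k : Int) + 1 by push_cast; ring,
        PySem.List.pyRange_one_succ_right (by positivity), List.foldl_append, ih (by omega)]
    simp only [List.foldl_cons, List.foldl_nil]
    have hk' : k < xs.length := by omega
    rw [PySem.List.pyGetD_natCast, List.getD_eq_getElem _ _ hk', List.sum_take_succ _ _ hk']

lemma sum_pyRange_drop (xs : List Int) (idx : Int) (h0 : 0 ≤ idx) :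
    (PySem.List.pyRange idx (xs.length : Int)).foldl
      (fun a item => a + PySem.List.pyGetD xs item 0) 0 = (xs.drop idx.toNat).sum := by
  rw [PySem.List.foldl_pyRange_pyGetD' xs 0 (fun a v => a + v) 0 h0, List.sum_eq_foldl]

lemma monthList_eq (xs : List Int) :
    ((PySem.List.pyRange 1 (xs.length : Int)).foldl (fun ml idx =>
      let avg1 := (PySem.List.pyRange 0 idx).foldl
        (fun a item => a + PySem.List.pyGetD xs item 0) 0
      let avg1 := PySem.Int.floordiv avg1 idx
      let avg2 := (PySem.List.pyRange idx (xs.length : Int)).foldl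
        (fun a item => a + PySem.List.pyGetD xs item 0) 0
      let avg2 := PySem.Int.floordiv avg2 ((xs.length : Int) - idx)
      ml ++ [|avg1 - avg2|]) []) = (PySem.List.pyRange 1 (xs.length : Int)).map (pvF xs) := by
  rw [show (fun (ml : List Int) idx =>
      let avg1 := (PySem.List.pyRange 0 idx).foldl
        (fun a item => a + PySem.List.pyGetD xs item 0) 0
      let avg1 := PySem.Int.floordiv avg1 idx
      let avg2 := (PySem.List.pyRange idx (xs.length : Int)).foldl
        (fun a item => a + PySem.List.pyGetD xs item 0) 0
      let avg2 := PySem.Int.floordiv avg2 ((xs.length : Int) - idx)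
      ml ++ [|avg1 - avg2|]) = (fun ml idx => ml ++ [(fun idx =>
        |PySem.Int.floordiv ((PySem.List.pyRange 0 idx).foldl
            (fun a item => a + PySem.List.pyGetD xs item 0) 0) idx -
         PySem.Int.floordiv ((PySem.List.pyRange idx (xs.length : Int)).foldl
            (fun a item => a + PySem.List.pyGetD xs item 0) 0) ((xs.length : Int) - idx)|) idx])
      from rfl,
    PySem.List.foldl_append_singleton_eq_map]
  rw [List.nil_append]
  apply List.map_congr_left
  intro idx hmem
  rw [PySem.List.mem_pyRange_one] at hmem
  have h0 : 0 ≤ idx := by omega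
  have hcast : ((idx.toNat : Nat) : Int) = idx := Int.toNat_of_nonneg h0
  have htk : idx.toNat ≤ xs.length := by omega
  rw [show (PySem.List.pyRange 0 idx) = PySem.List.pyRange 0 ((idx.toNat : Nat) : Int) by rw [hcast]]
  rw [sum_pyRange_take xs idx.toNat htk, sum_pyRange_drop xs idx h0, pvF]

lemma scanA (xs : List Int) (k : Nat) (h2 : 2 ≤ k) (hk : k ≤ xs.length) :
    (PySem.List.pyRange 0 ((k : Int) - 1)).foldl
      (fun (st : Int × Int) idx =>
        if PySem.List.pyGetD ((PySem.List.pyRange 1 (xs.length : Int)).map (pvF xs)) idx 0 < st.1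
        then (PySem.List.pyGetD ((PySem.List.pyRange 1 (xs.length : Int)).map (pvF xs)) idx 0, idx + 1)
        else st) (pvF xs 1, 0) = pvM xs k := by
  induction k with
  | zero => omega
  | succ k ih =>
    rcases Nat.lt_or_ge k 2 with hlt | hge
    · -- k + 1 = 2, so k = 1
      obtain rfl : k = 1 := by omega
      have : ((2 : Nat) : Int) - 1 = 0 + 1 := by norm_num
      rw [this, PySem.List.pyRange_one_succ_right (by norm_num)]
      simp only [PySem.List.pyRange_one_eq_nil le_rfl, List.nil_append, List.foldl_cons,
        List.foldl_nil]
      rw [ml_get xs 0 le_rfl (by omega)]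
      simp [pvM]
    · have hkx : k ≤ xs.length := by omega
      have hstep : ((k + 1 : Nat) : Int) - 1 = ((k : Int) - 1) + 1 := by push_cast; ring
      rw [hstep, PySem.List.pyRange_one_succ_right (by omega), List.foldl_append, ih hge hkx]
      simp only [List.foldl_cons, List.foldl_nil]
      rw [ml_get xs ((k : Int) - 1) (by omega) (by omega)]
      rw [pvM_succ xs k hge]
      have : (k : Int) - 1 + 1 = (k : Int) := by ring
      rw [this]

lemma take_one_sum (xs : List Int) (h : 1 ≤ xs.length) :
    (xs.take 1).sum = PySem.List.pyGetD xs 0 0 := by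
  rw [show (0 : Int) = ((0 : Nat) : Int) from rfl, PySem.List.pyGetD_natCast,
      List.getD_eq_getElem _ _ h, List.sum_take_succ _ _ h]
  simp

lemma sum_sub_take (xs : List Int) (k : Nat) :
    xs.sum - (xs.take k).sum = (xs.drop k).sum := by
  have := List.sum_take_add_sum_drop xs k
  omega

lemma scanB (xs : List Int) (k : Nat) (h2 : 2 ≤ k) (hk : k ≤ xs.length) :
    (PySem.List.pyRange 2 (k : Int)).foldl
      (fun (st : Int × Int × Int) idx =>
        let running := st.1 + PySem.List.pyGetD xs (idx - 1) 0
        let d := |PySem.Int.floordiv running idx -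
                  PySem.Int.floordiv (xs.sum - running) ((xs.length : Int) - idx)|
        if d < st.2.1 then (running, d, idx) else (running, st.2.1, st.2.2))
      (PySem.List.pyGetD xs 0 0,
       |PySem.List.pyGetD xs 0 0 -
        PySem.Int.floordiv (xs.sum - PySem.List.pyGetD xs 0 0) ((xs.length : Int) - 1)|, 0)
    = ((xs.take (k - 1)).sum, pvM xs k) := by
  have hx1 : 1 ≤ xs.length := by omega
  have hinit1 : PySem.List.pyGetD xs 0 0 = (xs.take 1).sum := (take_one_sum xs hx1).symm
  have hinitF : |PySem.List.pyGetD xs 0 0 -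
        PySem.Int.floordiv (xs.sum - PySem.List.pyGetD xs 0 0) ((xs.length : Int) - 1)|
      = pvF xs 1 := by
    have h1 : PySem.Int.floordiv ((xs.take 1).sum) 1 = (xs.take 1).sum := by
      rw [PySem.Int.floordiv_eq_ediv_of_pos one_pos, Int.ediv_one]
    rw [hinit1, sum_sub_take xs 1, pvF, show ((1 : Int).toNat) = 1 from rfl, h1]
  induction k with
  | zero => omega
  | succ k ih =>
    rcases Nat.lt_or_ge k 2 with hlt | hge
    · obtain rfl : k = 1 := by omega
      rw [show ((2 : Nat) : Int) = 2 from rfl, PySem.List.pyRange_one_eq_nil le_rfl,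
          List.foldl_nil, hinitF, hinit1]
      simp [pvM]
    · have hkx : k ≤ xs.length := by omega
      rw [show ((k + 1 : Nat) : Int) = (k : Int) + 1 by push_cast; ring,
          PySem.List.pyRange_one_succ_right (by omega), List.foldl_append, ih hge hkx]
      simp only [List.foldl_cons, List.foldl_nil]
      have hk1 : k - 1 < xs.length := by omega
      have hrun : (xs.take (k - 1)).sum + PySem.List.pyGetD xs ((k : Int) - 1) 0
          = (xs.take k).sum := by
        rw [show (k : Int) - 1 = ((k - 1 : Nat) : Int) by omega, PySem.List.pyGetD_natCast,
            List.getD_eq_getElem _ _ hk1, ← List.sum_take_succ _ _ hk1,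
            show k - 1 + 1 = k by omega]
      rw [hrun]
      have hd : |PySem.Int.floordiv ((xs.take k).sum) (k : Int) -
            PySem.Int.floordiv (xs.sum - (xs.take k).sum) ((xs.length : Int) - (k : Int))|
          = pvF xs (k : Int) := by
        rw [sum_sub_take xs k, pvF, Int.toNat_natCast]
      rw [hd, pvM_succ xs k hge, show k + 1 - 1 = k from rfl]
      split <;> rfl

-- ===== VERDICT (by name: the statement is the Claim_ definition above) =====
theorem findEarliestMonth_spec : Claim_equal_findEarliestMonth := by
  intro xs _hdom hpre
  unfold Pre_findEarliestMonth at hpre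
  unfold Spec_findEarliestMonth findEarliestMonth findEarliestMonth_alt
  simp only [monthList_eq xs]
  have hlen : ((((PySem.List.pyRange 1 ((xs.length : Nat) : Int)).map (pvF xs)).length : Nat) : Int)
      = ((xs.length : Nat) : Int) - 1 := by
    simp only [List.length_map, PySem.List.length_pyRange_one]
    omega
  rw [hlen, ml_get xs 0 le_rfl (by omega), show (0 : Int) + 1 = 1 from rfl,
      scanA xs xs.length hpre le_rfl, scanB xs xs.length hpre le_rfl]
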